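-- pv_equiv track=rewrite | github.com/TprocUni/GEA | final_code_submission/FINAL/GA_main.py | evalFitnessRow
-- ===== SOURCE A (Python) =====
-- from collections import Counter
--
-- def evalFitnessRow(grid):
--     fitness = 0
--     for row in grid:
--         #make dict of row
--         rowCounter = Counter(row)
--         for key, val in rowCounter.items():
--             if val > 1:
--                 fitness += (val - 1)
--
--     return fitness
-- ===== SOURCE B (Python) =====
-- def evalFitnessRow(grid):
--     fitness = 0
--     for row in grid:
--         s = sorted(row)
--         for x, y in zip(s, s[1:]):
--             if x == y:
--                 fitness += 1
--     return fitness
-- ===== Notes on version B (the rewrite author's own statement) =====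
-- stated objective: alternative
-- what changed: Replaces A's per-row Counter and inner loop over multiplicities (adding val-1 when val>1) by sort-then-scan: each row is sorted and the adjacent equal pairs of the sorted row are counted, since duplicates group together after sorting and a row with k copies of a value contributes exactly k-1 adjacent equal pairs.
import Mathlib
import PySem

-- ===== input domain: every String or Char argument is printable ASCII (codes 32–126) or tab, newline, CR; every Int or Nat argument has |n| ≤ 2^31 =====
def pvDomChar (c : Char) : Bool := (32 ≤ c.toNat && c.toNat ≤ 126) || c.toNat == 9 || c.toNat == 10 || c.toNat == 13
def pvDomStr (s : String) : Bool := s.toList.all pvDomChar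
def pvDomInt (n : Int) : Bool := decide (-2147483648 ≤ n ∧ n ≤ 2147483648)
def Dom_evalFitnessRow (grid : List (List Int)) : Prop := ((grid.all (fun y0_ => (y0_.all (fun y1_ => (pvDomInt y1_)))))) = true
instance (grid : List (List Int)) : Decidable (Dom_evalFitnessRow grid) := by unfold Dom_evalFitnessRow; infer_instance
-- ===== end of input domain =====

-- B replaces A's per-row Counter + inner loop over multiplicities by sort-then-scan:
-- it sorts each row and counts adjacent equal pairs; objective: alternative algorithm.

-- ===== PORT A =====
-- for row in grid: rowCounter = Counter(row); for key, val in rowCounter.items(): if val > 1: fitness += val - 1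
def evalFitnessRow (grid : List (List Int)) : Int :=
  grid.foldl (fun fitness row =>
    (PySem.Dict.counter row).items.foldl
      (fun f kv => if kv.2 > 1 then f + (kv.2 - 1) else f) fitness) 0

-- ===== PORT B =====
-- for row in grid: s = sorted(row); for x, y in zip(s, s[1:]): if x == y: fitness += 1
def evalFitnessRow_alt (grid : List (List Int)) : Int :=
  grid.foldl (fun fitness row =>
    let s := PySem.List.sorted row (fun x => x) false
    (s.zip (PySem.List.slice s (some 1) none)).foldl
      (fun f xy => if xy.1 = xy.2 then f + 1 else f) fitness) 0

-- ===== PRECONDITION & SPEC =====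
def Spec_evalFitnessRow (grid : List (List Int)) (out : Int) : Prop := out = evalFitnessRow_alt grid
instance (grid : List (List Int)) (out : Int) : Decidable (Spec_evalFitnessRow grid out) := by unfold Spec_evalFitnessRow; infer_instance

-- ===== CLAIM (what is proved, stated in full; the proofs are below) =====
def Claim_equal_evalFitnessRow : Prop := ∀ (grid : List (List Int)), Dom_evalFitnessRow grid → Spec_evalFitnessRow grid (evalFitnessRow grid)

-- ===== LEMMAS AND PROOFS =====

-- The counts of the distinct elements of a row sum to the row's length.
lemma sum_count_ofList (row : List Int) :
    ((PySem.Set.ofList row).map (fun k => List.count k row)).sum = row.length := by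
  have hperm : (PySem.Set.ofList row).Perm row.dedup :=
    (List.perm_ext_iff_of_nodup (PySem.Set.nodup_ofList row) row.nodup_dedup).mpr
      (by intro x; simp [PySem.Set.mem_ofList])
  rw [List.Perm.sum_eq (hperm.map _)]
  exact List.sum_map_count_dedup_eq_length row

lemma sum_sub_one {c : Int → Int} (S : List Int) :
    (S.map (fun k => c k - 1)).sum = (S.map c).sum - S.length := by
  induction S with
  | nil => simp
  | cons x xs ih => simp [ih]; ring

-- A's inner loop over Counter(row).items adds exactly len(row) - (number of distinct elements).
lemma rowA (row : List Int) (acc : Int) :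
    (PySem.Dict.counter row).items.foldl
      (fun f kv => if kv.2 > 1 then f + (kv.2 - 1) else f) acc
    = acc + ((row.length : Int) - ((PySem.Set.ofList row).length : Int)) := by
  rw [PySem.Dict.items_counter]
  have hstep : (fun (f : Int) (kv : Int × Int) => if kv.2 > 1 then f + (kv.2 - 1) else f)
      = fun f kv => f + (if kv.2 > 1 then kv.2 - 1 else 0) := by
    funext f kv; split <;> simp
  rw [hstep, PySem.List.foldl_add, List.map_map]
  have hmap : ((PySem.Set.ofList row).map
      ((fun kv : Int × Int => if kv.2 > 1 then kv.2 - 1 else 0) ∘ fun k => (k, (List.count k row : Int))))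
      = (PySem.Set.ofList row).map (fun k => (List.count k row : Int) - 1) := by
    apply List.map_congr_left
    intro k hk
    have : 0 < List.count k row := List.count_pos_iff.mpr ((PySem.Set.mem_ofList row k).mp hk)
    simp only [Function.comp]
    split <;> omega
  rw [hmap, sum_sub_one]
  have hcast : ((PySem.Set.ofList row).map (fun k => (List.count k row : Int))).sum
      = ((row.length : Int)) := by
    rw [show (fun k => (List.count k row : Int)) = (fun n : Nat => (n : Int)) ∘ (fun k => List.count k row) from rfl,
      ← List.map_map, ← Nat.cast_list_sum, sum_count_ofList row]
  rw [hcast]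

-- In a (≤)-sorted list, the adjacent equal pairs plus the distinct elements account for every position.
lemma adj_add_card (s : List Int) (h : s.Pairwise (· ≤ ·)) :
    (s.zip s.tail).countP (fun p => decide (p.1 = p.2)) + s.toFinset.card = s.length := by
  induction s with
  | nil => simp
  | cons a t ih =>
    cases t with
    | nil => simp
    | cons b t' =>
      have hab : a ≤ b := (List.pairwise_cons.mp h).1 b (by simp)
      have hrest := (List.pairwise_cons.mp h).2
      have iht := ih hrest
      have hz : ((a :: b :: t').zip (a :: b :: t').tail).countP (fun p => decide (p.1 = p.2))
          = ((b :: t').zip (b :: t').tail).countP (fun p => decide (p.1 = p.2))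
            + (if a = b then 1 else 0) := by
        simp only [List.tail_cons, List.zip_cons_cons, List.countP_cons, decide_eq_true_eq]
      have hcard : (a :: b :: t').toFinset.card
          = (b :: t').toFinset.card + (if a = b then 0 else 1) := by
        by_cases hEq : a = b
        · subst hEq
          simp [List.toFinset_cons]
        · have hnot : a ∉ (b :: t').toFinset := by
            intro hmemf
            rcases List.mem_cons.mp (List.mem_toFinset.mp hmemf) with h1 | h2
            · exact hEq h1
            · have hb_le : b ≤ a := List.rel_of_pairwise_cons hrest h2
              have ha_lt : a < b := lt_of_le_of_ne hab hEq
              omega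
          rw [show (a :: b :: t').toFinset = insert a (b :: t').toFinset from List.toFinset_cons,
            Finset.card_insert_of_notMem hnot, if_neg hEq]
      rw [hz, hcard, List.length_cons]
      split_ifs <;> omega

-- set(row) has as many elements as row.toFinset.
lemma ofList_length_eq_card (row : List Int) :
    (PySem.Set.ofList row).length = row.toFinset.card := by
  have hfin : (PySem.Set.ofList row).toFinset = row.toFinset := by
    ext x; simp [PySem.Set.mem_ofList]
  rw [← hfin]
  exact (List.toFinset_card_of_nodup (PySem.Set.nodup_ofList row)).symm

-- B's inner loop over the sorted row adds exactly len(row) - (number of distinct elements).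
lemma rowB (row : List Int) (acc : Int) :
    ((PySem.List.sorted row (fun x => x) false).zip
        (PySem.List.slice (PySem.List.sorted row (fun x => x) false) (some 1) none)).foldl
      (fun f xy => if xy.1 = xy.2 then f + 1 else f) acc
    = acc + ((row.length : Int) - ((PySem.Set.ofList row).length : Int)) := by
  rw [PySem.List.slice_from_one, PySem.List.foldl_ite_add_one]
  have hpair : (PySem.List.sorted row (fun x => x) false).Pairwise (· ≤ ·) :=
    PySem.List.sorted_pairwise row (fun x => x)
  have hadj := adj_add_card _ hpair
  have hlen := PySem.List.length_sorted row (fun x => x) false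
  have hfin : (PySem.List.sorted row (fun x => x) false).toFinset = row.toFinset := by
    ext x; simp [PySem.List.mem_sorted]
  rw [hlen, hfin] at hadj
  rw [ofList_length_eq_card]
  omega

-- ===== VERDICT (by name: the statement is the Claim_ definition above) =====
theorem evalFitnessRow_spec : Claim_equal_evalFitnessRow := by
  intro g _
  unfold Spec_evalFitnessRow evalFitnessRow evalFitnessRow_alt
  simp only [rowA, rowB]
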